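-- pv_equiv track=rewrite | github.com/miliar/Code_Jam_Webscraper | Solutions_python/Problem_117/851.py | get_ordered_heights
-- ===== SOURCE A (Python) =====
-- def get_ordered_heights(lawn, rows, columns):
--     heights = set([])
--
--     for i in range(0, rows):
--         for j in range(0, columns):
--             heights.add(lawn[i][j])
--
--     result = []
--     for height in heights:
--         result.append(height)
--
--     result.sort()
--     result.reverse()
--
--     return result
-- ===== SOURCE B (Python) =====
-- def get_ordered_heights(lawn, rows, columns):
--     values = []
--     for i in range(0, rows):
--         for j in range(0, columns):
--             values.append(lawn[i][j])
--
--     values.sort(reverse=True)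
--
--     result = []
--     for v in values:
--         if not result or result[-1] != v:
--             result.append(v)
--
--     return result
-- ===== Notes on version B (the rewrite author's own statement) =====
-- stated objective: alternative
-- what changed: Replaces hash-set deduplication followed by sort+reverse with collecting all values (duplicates included), one descending sort, and a single adjacent-comparison pass that skips repeats.
import Mathlib
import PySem

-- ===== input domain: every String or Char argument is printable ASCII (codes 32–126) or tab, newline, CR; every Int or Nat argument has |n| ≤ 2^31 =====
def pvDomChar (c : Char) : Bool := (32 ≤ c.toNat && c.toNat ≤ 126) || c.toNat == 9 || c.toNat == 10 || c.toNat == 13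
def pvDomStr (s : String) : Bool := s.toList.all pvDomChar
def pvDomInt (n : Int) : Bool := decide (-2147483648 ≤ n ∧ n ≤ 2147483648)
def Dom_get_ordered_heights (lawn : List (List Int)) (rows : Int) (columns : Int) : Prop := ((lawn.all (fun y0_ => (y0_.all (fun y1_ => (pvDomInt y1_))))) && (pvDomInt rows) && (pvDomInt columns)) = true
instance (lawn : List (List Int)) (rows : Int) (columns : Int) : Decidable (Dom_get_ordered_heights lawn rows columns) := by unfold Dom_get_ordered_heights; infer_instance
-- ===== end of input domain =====

-- B replaces A's hash-set dedup + ascending sort + reverse by one descending sort of all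
-- values followed by an adjacent-comparison dedup pass (alternative decomposition, same cost class).

-- ===== PORT A =====
def get_ordered_heights (lawn : List (List Int)) (rows : Int) (columns : Int) : List Int :=
  -- heights = set(); nested for-loops adding lawn[i][j]
  let heights : PySem.Set Int :=
    (PySem.List.pyRange 0 rows 1).foldl (fun h i =>
      (PySem.List.pyRange 0 columns 1).foldl (fun h j =>
        PySem.Set.add h (PySem.List.pyGetD (PySem.List.pyGetD lawn i []) j 0)) h)
      PySem.Set.empty
  -- result = []; for height in heights: result.append(height)
  let result : List Int := heights.foldl (fun r x => r ++ [x]) []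
  -- result.sort(); result.reverse()
  let result := PySem.List.sorted result (fun x => x) false
  result.reverse

-- ===== PORT B =====
def get_ordered_heights_alt (lawn : List (List Int)) (rows : Int) (columns : Int) : List Int :=
  -- values = []; nested for-loops appending lawn[i][j]
  let values : List Int :=
    (PySem.List.pyRange 0 rows 1).foldl (fun acc i =>
      (PySem.List.pyRange 0 columns 1).foldl (fun acc j =>
        acc ++ [PySem.List.pyGetD (PySem.List.pyGetD lawn i []) j 0]) acc)
      []
  -- values.sort(reverse=True)
  let values := PySem.List.sorted values (fun x => x) true
  -- adjacent dedup: for v in values: if not result or result[-1] != v: result.append(v)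
  values.foldl (fun r v =>
    if r = [] ∨ PySem.List.pyGetD r (-1) 0 ≠ v then r ++ [v] else r) []

-- ===== PRECONDITION & SPEC =====
-- Pre_ excludes exactly the inputs where A raises IndexError: some visited lawn[i] or lawn[i][j] is out of range.
def Pre_get_ordered_heights (lawn : List (List Int)) (rows : Int) (columns : Int) : Prop :=
  columns ≤ 0 ∨ (rows.toNat ≤ lawn.length ∧ ∀ row ∈ lawn.take rows.toNat, columns.toNat ≤ row.length)
instance (lawn : List (List Int)) (rows : Int) (columns : Int) : Decidable (Pre_get_ordered_heights lawn rows columns) := by unfold Pre_get_ordered_heights; infer_instance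

def pvWitness_get_ordered_heights : List (List Int) × Int × Int := ([[2, 1, 2], [3, 1, 1]], 2, 3)

def Spec_get_ordered_heights (lawn : List (List Int)) (rows : Int) (columns : Int) (out : List Int) : Prop := out = get_ordered_heights_alt lawn rows columns
instance (lawn : List (List Int)) (rows : Int) (columns : Int) (out : List Int) : Decidable (Spec_get_ordered_heights lawn rows columns out) := by unfold Spec_get_ordered_heights; infer_instance

-- ===== CLAIM (what is proved, stated in full; the proofs are below) =====
def Claim_equal_get_ordered_heights : Prop := ∀ (lawn : List (List Int)) (rows : Int) (columns : Int), Dom_get_ordered_heights lawn rows columns → Pre_get_ordered_heights lawn rows columns → Spec_get_ordered_heights lawn rows columns (get_ordered_heights lawn rows columns)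

-- ===== LEMMAS AND PROOFS =====

-- the flat list of values both ports visit, in visit order
def pvVals (lawn : List (List Int)) (rows : Int) (columns : Int) : List Int :=
  (PySem.List.pyRange 0 rows 1).flatMap (fun i =>
    (PySem.List.pyRange 0 columns 1).map (fun j =>
      PySem.List.pyGetD (PySem.List.pyGetD lawn i []) j 0))

-- B's dedup step
def pvStep (r : List Int) (v : Int) : List Int :=
  if r = [] ∨ PySem.List.pyGetD r (-1) 0 ≠ v then r ++ [v] else r

lemma pvA_eq (lawn : List (List Int)) (rows : Int) (columns : Int) :
    get_ordered_heights lawn rows columns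
      = (PySem.List.sorted (PySem.Set.ofList (pvVals lawn rows columns)) (fun x => x) false).reverse := by
  unfold get_ordered_heights pvVals
  rw [PySem.Set.ofList_eq_foldl, List.foldl_flatMap]
  simp only [List.foldl_map, PySem.List.foldl_append_singleton_eq_map (fun x => x), List.map_id_fun',
    id, List.nil_append]
  rfl

lemma pvB_eq (lawn : List (List Int)) (rows : Int) (columns : Int) :
    get_ordered_heights_alt lawn rows columns
      = (PySem.List.sorted (pvVals lawn rows columns) (fun x => x) true).foldl pvStep [] := by
  unfold get_ordered_heights_alt pvVals pvStep
  simp only [PySem.List.foldl_append_singleton_eq_map, PySem.List.foldl_append_eq_flatMap,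
    List.nil_append]

-- any element of a strictly descending list is ≥ its last element
lemma pvLast_min : ∀ (l : List Int), l.Pairwise (· > ·) → ∀ x ∈ l, ∀ h : l ≠ [], l.getLast h ≤ x := by
  intro l
  induction l with
  | nil => intro _ x hx; cases hx
  | cons a t ih =>
    intro hp x hx h
    cases t with
    | nil =>
      simp only [List.mem_singleton] at hx; subst hx; simp
    | cons b s =>
      have hne : (b :: s : List Int) ≠ [] := by simp
      rw [List.getLast_cons hne]
      rcases List.mem_cons.mp hx with rfl | hx'
      · have hm : (b :: s).getLast hne ∈ b :: s := List.getLast_mem hne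
        have := (List.pairwise_cons.mp hp).1 _ hm
        omega
      · exact ih (List.pairwise_cons.mp hp).2 x hx' hne

-- invariant of B's dedup fold
lemma pvDedup_spec : ∀ (l acc : List Int), l.Pairwise (fun a b => b ≤ a) → acc.Pairwise (· > ·) →
    (∀ y ∈ l, ∀ h : acc ≠ [], y ≤ acc.getLast h) →
    (l.foldl pvStep acc).Pairwise (· > ·) ∧ (∀ x, x ∈ l.foldl pvStep acc ↔ x ∈ acc ∨ x ∈ l) := by
  intro l
  induction l with
  | nil =>
    intro acc _ hacc _
    refine ⟨hacc, ?_⟩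
    simp
  | cons v l ih =>
    intro acc hl hacc hbound
    have hl1 : ∀ y ∈ l, y ≤ v := fun y hy => (List.pairwise_cons.mp hl).1 y hy
    have hl2 : l.Pairwise (fun a b => b ≤ a) := (List.pairwise_cons.mp hl).2
    rw [List.foldl_cons]
    by_cases hnil : acc = []
    · subst hnil
      have hstep : pvStep [] v = [v] := by simp [pvStep]
      rw [hstep]
      have hres := ih [v] hl2 (by simp) (by
        intro y hy h
        simpa using hl1 y hy)
      refine ⟨hres.1, ?_⟩
      intro x
      rw [hres.2 x]
      simp [or_comm]
    · have hlast : PySem.List.pyGetD acc (-1) 0 = acc.getLast hnil :=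
        PySem.List.pyGetD_neg_one acc 0 hnil
      by_cases hlv : acc.getLast hnil = v
      · have hstep : pvStep acc v = acc := by
          simp [pvStep, hnil, hlast, hlv]
        rw [hstep]
        have hres := ih acc hl2 hacc (by
          intro y hy h
          rw [hlv]
          exact hl1 y hy)
        refine ⟨hres.1, ?_⟩
        intro x
        rw [hres.2 x]
        constructor
        · rintro (hx | hx)
          · exact Or.inl hx
          · exact Or.inr (List.mem_cons_of_mem _ hx)
        · rintro (hx | hx)
          · exact Or.inl hx
          · rcases List.mem_cons.mp hx with rfl | hx'
            · exact Or.inl (hlv ▸ List.getLast_mem hnil)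
            · exact Or.inr hx'
      · have hstep : pvStep acc v = acc ++ [v] := by
          simp [pvStep, hlast, hlv]
        rw [hstep]
        have hvlast : v < acc.getLast hnil := by
          have := hbound v (List.mem_cons_self) hnil
          omega
        have hgt : ∀ x ∈ acc, x > v := by
          intro x hx
          have := pvLast_min acc hacc x hx hnil
          omega
        have hpair : (acc ++ [v]).Pairwise (· > ·) := by
          rw [List.pairwise_append]
          exact ⟨hacc, by simp, by intro x hx y hy; simp at hy; subst hy; exact hgt x hx⟩
        have hres := ih (acc ++ [v]) hl2 hpair (by
          intro y hy h
          have hgl : (acc ++ [v]).getLast h = v := by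
            simp
          rw [hgl]
          exact hl1 y hy)
        refine ⟨hres.1, ?_⟩
        intro x
        rw [hres.2 x]
        simp only [List.mem_append, List.mem_cons]
        tauto

-- strictly descending lists with the same members are equal
lemma pvUniq : ∀ (l1 l2 : List Int), l1.Pairwise (· > ·) → l2.Pairwise (· > ·) →
    (∀ x, x ∈ l1 ↔ x ∈ l2) → l1 = l2 := by
  intro l1
  induction l1 with
  | nil =>
    intro l2 _ _ hmem
    cases l2 with
    | nil => rfl
    | cons b s => exact absurd ((hmem b).mpr List.mem_cons_self) (by simp)
  | cons a t ih =>
    intro l2 h1 h2 hmem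
    cases l2 with
    | nil => exact absurd ((hmem a).mp List.mem_cons_self) (by simp)
    | cons b s =>
      have hab : a = b := by
        rcases List.mem_cons.mp ((hmem a).mp List.mem_cons_self) with h | h
        · exact h
        · rcases List.mem_cons.mp ((hmem b).mpr List.mem_cons_self) with h' | h'
          · omega
          · have := (List.pairwise_cons.mp h2).1 a h
            have := (List.pairwise_cons.mp h1).1 b h'
            omega
      subst hab
      have ht1 := (List.pairwise_cons.mp h1).2
      have ht2 := (List.pairwise_cons.mp h2).2
      have htm : ∀ x, x ∈ t ↔ x ∈ s := by
        intro x
        constructor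
        · intro hx
          have hgt := (List.pairwise_cons.mp h1).1 x hx
          rcases List.mem_cons.mp ((hmem x).mp (List.mem_cons_of_mem _ hx)) with rfl | h'
          · omega
          · exact h'
        · intro hx
          have hgt := (List.pairwise_cons.mp h2).1 x hx
          rcases List.mem_cons.mp ((hmem x).mpr (List.mem_cons_of_mem _ hx)) with rfl | h'
          · omega
          · exact h'
      rw [ih s ht1 ht2 htm]

-- ===== VERDICT (by name: the statement is the Claim_ definition above) =====
theorem get_ordered_heights_spec : Claim_equal_get_ordered_heights := by
  intro lawn rows columns _ _
  unfold Spec_get_ordered_heights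
  rw [pvA_eq, pvB_eq]
  set vals := pvVals lawn rows columns with hv
  have hA1 : (PySem.List.sorted (PySem.Set.ofList vals) (fun x => x) false).reverse.Pairwise (· > ·) := by
    rw [List.pairwise_reverse]
    exact (PySem.List.sorted_ofList_pairwise_lt (xs := vals)).imp (fun h => h)
  have hB := pvDedup_spec (PySem.List.sorted vals (fun x => x) true) []
    (PySem.List.sorted_pairwise_rev (xs := vals) (key := fun x => x)) List.Pairwise.nil
    (by intro y _ h; exact absurd rfl h)
  refine pvUniq _ _ hA1 hB.1 ?_
  intro x
  rw [(hB.2 x)]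
  simp [PySem.List.mem_sorted, PySem.Set.mem_ofList]
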